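-- pv_equiv track=rewrite | github.com/namwasinyourheart/tts-zipvoice-ft | zipvoice/utils/infer.py | chunk_tokens_punctuation
-- ===== SOURCE A (Python) =====
-- from typing import List
--
-- punctuation = {";", ":", ",", ".", "!", "?", "；", "：", "，", "。", "！", "？"}
--
-- def chunk_tokens_punctuation(tokens_list: List[str], max_tokens: int = 100):
--     """
--     Splits the input tokens list into chunks according to punctuations,
--         each with a maximum number of tokens.
--
--     Args:
--         token_list (list of str): The list of tokens to be split.
--         max_tokens (int): The maximum number of tokens per chunk.
--
--     Returns:
--         List[str]: A list of text chunks.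
--     """
--
--     # 1. Split the tokens according to punctuations.
--     sentences = []
--     current_sentence = []
--     for token in tokens_list:
--         # If the first token of current sentence is punctuation or blank,
--         # append it to the end of the previous sentence.
--         if (
--             len(current_sentence) == 0
--             and len(sentences) != 0
--             and (token in punctuation or token == " ")
--         ):
--             sentences[-1].append(token)
--         # Otherwise, append the current token to the current sentence.
--         else:
--             current_sentence.append(token)
--             # Split the sentence in positions of punctuations.
--             if token in punctuation:
--                 sentences.append(current_sentence)
--                 current_sentence = []
--     # Assume the last few tokens are also a sentence
--     if len(current_sentence) != 0:
--         sentences.append(current_sentence)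
--
--     # 2. Merge short sentences.
--     chunks = []
--     current_chunk = []
--     for sentence in sentences:
--         if len(current_chunk) + len(sentence) <= max_tokens:
--             current_chunk.extend(sentence)
--         else:
--             if len(current_chunk) > 0:
--                 chunks.append(current_chunk)
--             current_chunk = sentence
--
--     if len(current_chunk) > 0:
--         chunks.append(current_chunk)
--
--     return chunks
-- ===== SOURCE B (Python) =====
-- punctuation = {";", ":", ",", ".", "!", "?", "；", "：", "，", "。", "！", "？"}
--
-- def chunk_tokens_punctuation(tokens_list, max_tokens=100):
--     """Single streaming pass: sentences are merged into chunks as soon as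
--     they can no longer grow, instead of first collecting all sentences."""
--     chunks = []
--     current_chunk = []
--     pending = None  # last completed sentence, kept open for trailing punctuation
--     current_sentence = []
--
--     def commit(sentence):
--         nonlocal current_chunk
--         if len(current_chunk) + len(sentence) <= max_tokens:
--             current_chunk.extend(sentence)
--         else:
--             if current_chunk:
--                 chunks.append(current_chunk)
--             current_chunk = sentence
--
--     for token in tokens_list:
--         if not current_sentence and pending is not None and (token in punctuation or token == " "):
--             pending.append(token)
--         else:
--             current_sentence.append(token)
--             if token in punctuation:
--                 if pending is not None:
--                     commit(pending)
--                 pending = current_sentence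
--                 current_sentence = []
--     if current_sentence:
--         if pending is not None:
--             commit(pending)
--         pending = current_sentence
--     if pending is not None:
--         commit(pending)
--     if current_chunk:
--         chunks.append(current_chunk)
--     return chunks
-- ===== Notes on version B (the rewrite author's own statement) =====
-- stated objective: alternative
-- what changed: Replaced A's two sequential passes (collect all sentences, then merge them into chunks) by a single streaming loop that commits each sentence into the current chunk as soon as the next sentence starts, keeping only one 'pending' sentence open for trailing punctuation, so the intermediate sentences list is never materialised.
import Mathlib
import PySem

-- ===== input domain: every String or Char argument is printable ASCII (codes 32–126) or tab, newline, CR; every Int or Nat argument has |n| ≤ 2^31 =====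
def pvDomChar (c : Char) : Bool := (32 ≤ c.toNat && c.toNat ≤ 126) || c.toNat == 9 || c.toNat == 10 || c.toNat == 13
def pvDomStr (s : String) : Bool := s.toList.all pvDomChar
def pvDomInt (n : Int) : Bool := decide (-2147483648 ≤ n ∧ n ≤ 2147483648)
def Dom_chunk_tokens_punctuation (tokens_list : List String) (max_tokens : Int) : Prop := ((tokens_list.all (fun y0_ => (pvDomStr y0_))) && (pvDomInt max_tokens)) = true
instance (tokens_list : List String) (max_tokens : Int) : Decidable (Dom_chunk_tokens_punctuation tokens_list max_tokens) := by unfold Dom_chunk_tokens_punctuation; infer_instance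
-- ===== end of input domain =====

-- B fuses A's two passes into one streaming loop over the tokens (alternative decomposition; same cost).

-- ===== PORT A =====
-- the module-level `punctuation` set
def pvPunct : List String := [";", ":", ",", ".", "!", "?", "；", "：", "，", "。", "！", "？"]

-- sentences[-1].append(token)  (only reached when the list is nonempty)
def pvAppendLast (ss : List (List String)) (t : String) : List (List String) :=
  match ss.getLast? with
  | some l => ss.dropLast ++ [l ++ [t]]
  | none => ss

-- one iteration of A's pass-1 loop; state = (sentences, current_sentence)
def pvAStep (st : List (List String) × List String) (token : String) : List (List String) × List String :=
  if st.2.isEmpty && !st.1.isEmpty && (pvPunct.contains token || token == " ") then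
    (pvAppendLast st.1 token, st.2)
  else
    let cs := st.2 ++ [token]
    if pvPunct.contains token then (st.1 ++ [cs], []) else (st.1, cs)

-- one iteration of A's pass-2 loop; state = (chunks, current_chunk)
def pvMergeStep (mx : Int) (st : List (List String) × List String) (s : List String) :
    List (List String) × List String :=
  if (st.2.length : Int) + s.length ≤ mx then (st.1, st.2 ++ s)
  else ((if st.2.isEmpty then st.1 else st.1 ++ [st.2]), s)

def chunk_tokens_punctuation (tokens_list : List String) (max_tokens : Int) : List (List String) :=
  let p1 := tokens_list.foldl pvAStep ([], [])
  let sentences := if p1.2.isEmpty then p1.1 else p1.1 ++ [p1.2]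
  let p2 := sentences.foldl (pvMergeStep max_tokens) ([], [])
  if p2.2.isEmpty then p2.1 else p2.1 ++ [p2.2]

-- ===== PORT B =====
-- B's commit(sentence): merge a completed sentence into the running chunk state
def pvBCommit (mx : Int) (st : List (List String) × List String) (s : List String) :
    List (List String) × List String :=
  if (st.2.length : Int) + s.length ≤ mx then (st.1, st.2 ++ s)
  else ((if st.2.isEmpty then st.1 else st.1 ++ [st.2]), s)

-- one iteration of B's single loop; state = ((chunks, current_chunk), pending, current_sentence)
def pvBStep (mx : Int)
    (st : (List (List String) × List String) × Option (List String) × List String)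
    (token : String) :
    (List (List String) × List String) × Option (List String) × List String :=
  if st.2.2.isEmpty && st.2.1.isSome && (pvPunct.contains token || token == " ") then
    (st.1, st.2.1.map (fun p => p ++ [token]), st.2.2)
  else
    let cs := st.2.2 ++ [token]
    if pvPunct.contains token then
      ((match st.2.1 with | some p => pvBCommit mx st.1 p | none => st.1), some cs, [])
    else (st.1, st.2.1, cs)

def chunk_tokens_punctuation_alt (tokens_list : List String) (max_tokens : Int) : List (List String) :=
  let st := tokens_list.foldl (pvBStep max_tokens) ((([], []), none, []))
  let st2 : (List (List String) × List String) × Option (List String) :=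
    if st.2.2.isEmpty then (st.1, st.2.1)
    else ((match st.2.1 with | some p => pvBCommit max_tokens st.1 p | none => st.1), some st.2.2)
  let ms := match st2.2 with | some p => pvBCommit max_tokens st2.1 p | none => st2.1
  if ms.2.isEmpty then ms.1 else ms.1 ++ [ms.2]

-- ===== PRECONDITION & SPEC =====
def Spec_chunk_tokens_punctuation (tokens_list : List String) (max_tokens : Int) (out : List (List String)) : Prop := out = chunk_tokens_punctuation_alt tokens_list max_tokens
instance (tokens_list : List String) (max_tokens : Int) (out : List (List String)) : Decidable (Spec_chunk_tokens_punctuation tokens_list max_tokens out) := by unfold Spec_chunk_tokens_punctuation; infer_instance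

-- ===== CLAIM (what is proved, stated in full; the proofs are below) =====
def Claim_equal_chunk_tokens_punctuation : Prop := ∀ (tokens_list : List String) (max_tokens : Int), Dom_chunk_tokens_punctuation tokens_list max_tokens → Spec_chunk_tokens_punctuation tokens_list max_tokens (chunk_tokens_punctuation tokens_list max_tokens)

-- ===== LEMMAS AND PROOFS =====

-- Abstraction: B's loop state determined by A's pass-1 state — the chunks of all but the last
-- sentence are already merged, the last sentence is 'pending'.
def pvProj (mx : Int) (ast : List (List String) × List String) :
    (List (List String) × List String) × Option (List String) × List String :=
  match ast.1.getLast? with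
  | none => (([], []), none, ast.2)
  | some l => (ast.1.dropLast.foldl (pvMergeStep mx) ([], []), some l, ast.2)

theorem pvProj_nil (mx : Int) (cs : List String) :
    pvProj mx ([], cs) = (([], []), none, cs) := rfl

theorem pvProj_concat (mx : Int) (init : List (List String)) (l : List String) (cs : List String) :
    pvProj mx (init ++ [l], cs) = (init.foldl (pvMergeStep mx) ([], []), some l, cs) := by
  simp [pvProj]

theorem pvProj_singleton (mx : Int) (s : List String) (cs : List String) :
    pvProj mx ([s], cs) = (([], []), some s, cs) := rfl

theorem pvProj_concat2 (mx : Int) (init : List (List String)) (l x : List String) (cs : List String) :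
    pvProj mx (init ++ [l, x], cs)
      = (pvMergeStep mx (init.foldl (pvMergeStep mx) ([], [])) l, some x, cs) := by
  have h : init ++ [l, x] = (init ++ [l]) ++ [x] := by simp
  rw [h, pvProj_concat, List.foldl_append]
  simp [List.foldl]

theorem pvAppendLast_concat (init : List (List String)) (l : List String) (t : String) :
    pvAppendLast (init ++ [l]) t = init ++ [l ++ [t]] := by
  simp [pvAppendLast]

theorem pvBCommit_eq (mx : Int) (st : List (List String) × List String) (s : List String) :
    pvBCommit mx st s = pvMergeStep mx st s := rfl

theorem pvStep_proj (mx : Int) (st : List (List String) × List String) (t : String) :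
    pvBStep mx (pvProj mx st) t = pvProj mx (pvAStep st t) := by
  obtain ⟨ss, cs⟩ := st
  rcases ss.eq_nil_or_concat with rfl | ⟨init, l, rfl⟩
  · by_cases hP : t ∈ pvPunct <;>
      simp [pvProj_nil, pvProj_singleton, pvAStep, pvBStep, hP]
  · by_cases hC : cs = [] <;> by_cases hP : t ∈ pvPunct <;> by_cases hS : t = " " <;>
      simp [pvAStep, pvBStep, pvProj_concat, pvProj_concat2, pvAppendLast_concat,
        pvBCommit_eq, hC, hP, hS] <;>
      simp [show ¬ (" " ∈ pvPunct) by decide, pvProj_concat]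

theorem pvFold_proj (mx : Int) (toks : List String) (st : List (List String) × List String) :
    toks.foldl (pvBStep mx) (pvProj mx st) = pvProj mx (toks.foldl pvAStep st) := by
  induction toks generalizing st with
  | nil => rfl
  | cons t ts ih => simp [List.foldl, pvStep_proj, ih]

theorem pvMain (tl : List String) (mx : Int) :
    chunk_tokens_punctuation tl mx = chunk_tokens_punctuation_alt tl mx := by
  unfold chunk_tokens_punctuation chunk_tokens_punctuation_alt
  have h0 : ((([], []), none, []) :
      (List (List String) × List String) × Option (List String) × List String)
      = pvProj mx ([], []) := rfl
  rw [h0, pvFold_proj]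
  obtain ⟨ss, cs⟩ : List (List String) × List String := tl.foldl pvAStep ([], [])
  rcases ss.eq_nil_or_concat with rfl | ⟨init, l, rfl⟩
  · by_cases hc : cs.isEmpty <;>
      simp [pvProj_nil, hc, pvBCommit_eq]
  · by_cases hc : cs.isEmpty <;>
      simp [pvProj_concat, hc, pvBCommit_eq, List.foldl_append]

-- ===== VERDICT (by name: the statement is the Claim_ definition above) =====
theorem chunk_tokens_punctuation_spec : Claim_equal_chunk_tokens_punctuation := by
  intro tl mx _
  unfold Spec_chunk_tokens_punctuation
  exact pvMain tl mx
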